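-- pv_equiv track=rewrite | github.com/NanProduced/linkding | bookmarks/services/tag_recommendation.py | map_tokens_to_tags
-- ===== SOURCE A (Python) =====
-- def map_tokens_to_tags(tokens: list[str], existing_tags: list[str]) -> dict[str, list[str]]:
--     token_to_tags = {}
--     for token in tokens:
--         matching_tags = []
--         for tag in existing_tags:
--             if token == tag or tag.startswith(token) or token.startswith(tag):
--                 matching_tags.append(tag)
--         if matching_tags:
--             token_to_tags[token] = matching_tags
--     return token_to_tags
-- ===== SOURCE B (Python) =====
-- def map_tokens_to_tags(tokens: list[str], existing_tags: list[str]) -> dict[str, list[str]]: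
--     # Inverted prefix index: one pass over the tags registers each tag index
--     # under every prefix of the tag (prefix_index) and under the tag itself
--     # (exact).  Each token then collects its matching tag indices by O(len)
--     # dictionary lookups -- prefix_index[token] gives the tags extending the
--     # token, exact[token[:k]] the tags the token extends -- and the indices,
--     # sorted, reproduce the tags in original order.  No scan over all tags
--     # per token.
--     prefix_index = {}
--     exact = {}
--     for i, tag in enumerate(existing_tags):
--         exact.setdefault(tag, []).append(i)
--         for k in range(len(tag) + 1):
--             prefix_index.setdefault(tag[:k], []).append(i)
--     result = {}
--     for token in tokens:
--         matched = set(prefix_index.get(token, []))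
--         for k in range(len(token)):
--             matched.update(exact.get(token[:k], []))
--         if matched:
--             result[token] = [existing_tags[i] for i in sorted(matched)]
--     return result
-- ===== Notes on version B (the rewrite author's own statement) =====
-- stated objective: faster
-- what changed: B builds an inverted index over the tags once (every tag prefix -> list of tag indices, plus tag -> indices), then resolves each token by dictionary lookups on the token and its proper prefixes, sorting the collected indices to restore tag order, instead of A's scan of the whole tag list per token.
import Mathlib
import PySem

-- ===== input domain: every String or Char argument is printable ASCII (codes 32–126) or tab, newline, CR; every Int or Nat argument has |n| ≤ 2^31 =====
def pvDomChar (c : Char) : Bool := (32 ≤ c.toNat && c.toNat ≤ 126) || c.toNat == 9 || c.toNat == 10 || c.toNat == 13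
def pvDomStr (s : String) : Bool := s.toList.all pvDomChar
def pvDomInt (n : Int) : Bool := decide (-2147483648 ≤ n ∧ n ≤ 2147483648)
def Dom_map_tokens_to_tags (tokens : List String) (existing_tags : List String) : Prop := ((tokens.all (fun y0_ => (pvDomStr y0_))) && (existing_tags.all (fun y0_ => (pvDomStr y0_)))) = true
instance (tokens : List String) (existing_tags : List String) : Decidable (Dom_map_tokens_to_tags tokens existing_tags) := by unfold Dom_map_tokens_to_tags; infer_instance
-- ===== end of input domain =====

-- B replaces A's per-token scan over all tags by an inverted index built once over the tags
-- (every tag prefix -> tag indices, tag -> tag indices); per token it collects matching indices by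
-- dictionary lookups and sorts them; a timing run reports whether this is measurably faster.


-- ===== PORT A =====
def map_tokens_to_tags (tokens : List String) (existing_tags : List String) : List (String × List String) :=
  (tokens.foldl (fun (d : PySem.Dict String (List String)) token =>
      let matching_tags := existing_tags.foldl (fun acc tag =>
        if token == tag || PySem.Str.startswith tag token || PySem.Str.startswith token tag
        then acc ++ [tag] else acc) ([] : List String)
      if matching_tags.isEmpty then d else d.insert token matching_tags)
    PySem.Dict.empty).items

-- ===== PORT B =====
def map_tokens_to_tags_alt (tokens : List String) (existing_tags : List String) : List (String × List String) :=
  -- build the inverted index once: for tag index i, register i under every prefix tag[:k] (.1)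
  -- and under the tag itself (.2)
  let built :=
    (PySem.List.enumerate existing_tags).foldl
      (fun (st : PySem.Dict String (List Int) × PySem.Dict String (List Int)) p =>
        ((PySem.List.pyRange 0 (PySem.Str.len p.2 + 1) 1).foldl
            (fun d k => d.modify (PySem.Str.slice p.2 none (some k)) [] (fun l => l ++ [p.1])) st.1,
         st.2.modify p.2 [] (fun l => l ++ [p.1])))
      (PySem.Dict.empty, PySem.Dict.empty)
  (tokens.foldl
    (fun (result : PySem.Dict String (List String)) token =>
      let matched : PySem.Set Int :=
        (PySem.List.pyRange 0 (PySem.Str.len token) 1).foldl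
          (fun s k => PySem.Set.update s (built.2.getD (PySem.Str.slice token none (some k)) []))
          (PySem.Set.ofList (built.1.getD token []))
      if matched.isEmpty then result
      else result.insert token
        ((PySem.List.sorted matched (fun i => i)).map (fun i => PySem.List.pyGetD existing_tags i "")))
    PySem.Dict.empty).items

-- ===== PRECONDITION & SPEC =====
def Spec_map_tokens_to_tags (tokens : List String) (existing_tags : List String) (out : List (String × List String)) : Prop := out = map_tokens_to_tags_alt tokens existing_tags
instance (tokens : List String) (existing_tags : List String) (out : List (String × List String)) : Decidable (Spec_map_tokens_to_tags tokens existing_tags out) := by unfold Spec_map_tokens_to_tags; infer_instance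

-- ===== CLAIM (what is proved, stated in full; the proofs are below) =====
def Claim_equal_map_tokens_to_tags : Prop := ∀ (tokens : List String) (existing_tags : List String), Dom_map_tokens_to_tags tokens existing_tags → Spec_map_tokens_to_tags tokens existing_tags (map_tokens_to_tags tokens existing_tags)

-- ===== LEMMAS AND PROOFS =====

def pvIdxs (tags : List String) (p : String → Bool) : List Int :=
  ((List.range tags.length).filter (fun k => p (tags.getD k ""))).map (fun (k : Nat) => (k : Int))

theorem pv_beq (s c : String) : (s == c) = decide (s.toList = c.toList) := by
  rcases Decidable.eq_or_ne s c with h|h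
  · subst h; simp
  · have h2 : s.toList ≠ c.toList := fun hh => h (String.toList_inj.mp hh)
    simp [h, h2]

theorem pv_slice_toList (t : String) (u : Nat) :
    (PySem.Str.slice t none (some (u : Int))).toList = t.toList.take u := by
  rw [PySem.Str.toList_slice, PySem.Chars.slice_eq_listSlice, PySem.List.slice_to_natCast]

theorem pv_range_filter_eq (n v : Nat) :
    (List.range n).filter (fun k => k == v) = if v < n then [v] else [] := by
  induction n with
  | zero => simp
  | succ n ih =>
    rw [List.range_succ, List.filter_append, ih]
    by_cases h : v < n
    · have hne : v ≠ n := by omega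
      simp [h, Nat.lt_succ_of_lt h, Ne.symm hne]
    · by_cases h2 : v = n
      · subst h2; simp
      · have h3 : ¬ v < n + 1 := by omega
        simp [h, h3, Ne.symm h2]

theorem pv_flatMap_if {α β : Type} (l : List α) (p : α → Bool) (f : α → β) :
    l.flatMap (fun x => if p x then [f x] else []) = (l.filter p).map f := by
  induction l with
  | nil => simp
  | cons x l ih =>
    by_cases h : p x <;> simp [List.flatMap_cons, h, ih]

theorem pv_filter_getD (xs : List String) (p : String → Bool) :
    ((List.range xs.length).filter (fun k => p (xs.getD k ""))).map (fun k => xs.getD k "") = xs.filter p := by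
  induction xs with
  | nil => simp
  | cons x xs ih =>
    rw [List.length_cons, List.range_succ_eq_map, List.filter_cons, List.filter_map]
    have hc : ((fun k => p ((x :: xs).getD k "")) ∘ Nat.succ) = fun k => p (xs.getD k "") := by
      funext k; simp
    have hm : ((fun k => (x :: xs).getD k "") ∘ Nat.succ) = fun k => xs.getD k "" := by
      funext k; simp
    rw [hc]
    by_cases h : p x
    · simp only [List.getD_cons_zero, h, if_pos]
      rw [List.map_cons, List.map_map, hm, ih, List.filter_cons, if_pos h]
      simp
    · simp only [List.getD_cons_zero, h, Bool.false_eq_true, if_neg, not_false_eq_true]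
      rw [List.map_map, hm, ih, List.filter_cons]
      simp [h]

theorem pv_slice_filter (tag c : String) :
    (PySem.List.pyRange 0 (PySem.Str.len tag + 1) 1).filter (fun k => PySem.Str.slice tag none (some k) == c)
    = if PySem.Str.startswith tag c then [(c.toList.length : Int)] else [] := by
  rw [PySem.Str.len_eq, PySem.List.pyRange_one]
  have hn : (((tag.toList.length : Int) + 1) - 0).toNat = tag.toList.length + 1 := by omega
  rw [hn, List.filter_map]
  have hcond : ((fun k => PySem.Str.slice tag none (some k) == c) ∘ (fun k : Nat => (0:Int) + (k:Int)))
      = fun k : Nat => decide (tag.toList.take k = c.toList) := by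
    funext k
    simp only [Function.comp, zero_add, pv_beq, pv_slice_toList]
  rw [hcond]
  by_cases hsw : PySem.Str.startswith tag c = true
  · have hpre : c.toList <+: tag.toList := List.isPrefixOf_iff_prefix.mp hsw
    have hle : c.toList.length ≤ tag.toList.length := hpre.length_le
    have hcg : ∀ k ∈ List.range (tag.toList.length + 1),
        (decide (tag.toList.take k = c.toList)) = (k == c.toList.length) := by
      intro k hk
      rw [List.mem_range] at hk
      rcases Decidable.eq_or_ne k c.toList.length with h|h
      · subst h
        have he : tag.toList.take c.toList.length = c.toList := (List.prefix_iff_eq_take.mp hpre).symm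
        rw [he]
        simp
      · have hno : tag.toList.take k ≠ c.toList := by
          intro he
          have := congrArg List.length he
          simp only [List.length_take] at this
          omega
        rw [decide_eq_false hno]
        exact (beq_eq_false_iff_ne.mpr h).symm
    rw [List.filter_congr hcg, pv_range_filter_eq]
    rw [if_pos (by omega : c.toList.length < tag.toList.length + 1), if_pos hsw]
    simp
  · have hcg : ∀ k ∈ List.range (tag.toList.length + 1),
        (decide (tag.toList.take k = c.toList)) = false := by
      intro k _
      simp only [decide_eq_false_iff_not]
      intro he
      exact hsw (List.isPrefixOf_iff_prefix.mpr (he ▸ List.take_prefix k tag.toList))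
    rw [List.filter_congr hcg, if_neg hsw]
    simp

def pvExactD (tags : List String) : PySem.Dict String (List Int) :=
  (PySem.List.enumerate tags).foldl (fun d p => d.modify p.2 [] (fun l => l ++ [p.1])) PySem.Dict.empty

def pvPrefixD (tags : List String) : PySem.Dict String (List Int) :=
  (PySem.List.enumerate tags).foldl
    (fun d p => (PySem.List.pyRange 0 (PySem.Str.len p.2 + 1) 1).foldl
      (fun d k => d.modify (PySem.Str.slice p.2 none (some k)) [] (fun l => l ++ [p.1])) d)
    PySem.Dict.empty

-- the common final reshaping: the filtered enumeration projected to first components is pvIdxs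
theorem pv_enum_filter_map (tags : List String) (r : Int × String → Bool) (q : String → Bool)
    (hr : r = fun p => q p.2) :
    ((PySem.List.enumerate tags).filter r).map (fun p => p.1) = pvIdxs tags q := by
  subst hr
  rw [PySem.List.enumerate_eq_map_pyRange tags "", List.filter_map, List.map_map,
    PySem.List.pyRange_one, List.filter_map, List.map_map]
  have hn : ((PySem.List.len tags) - 0).toNat = tags.length := by
    simp [PySem.List.len]
  rw [hn]
  have hc : (((fun p : Int × String => q p.2) ∘ fun j => (j, PySem.List.pyGetD tags j "")) ∘ fun k : Nat => (0:Int) + (k:Int))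
      = fun k : Nat => q (tags.getD k "") := by
    funext k
    simp [Function.comp, PySem.List.pyGetD_natCast]
  have hv : (((fun p : Int × String => p.1) ∘ fun j => (j, PySem.List.pyGetD tags j "")) ∘ fun k : Nat => (0:Int) + (k:Int))
      = fun k : Nat => (k : Int) := by
    funext k; simp [Function.comp]
  rw [hc, hv]
  simp only [pvIdxs]

theorem pv_exactD_getD (tags : List String) (c : String) :
    (pvExactD tags).getD c [] = pvIdxs tags (fun s => s == c) := by
  have h2 : pvExactD tags = ((PySem.List.enumerate tags).map (fun p => (p.2, p.1))).foldl
      (fun d q => d.modify q.1 [] (fun l => l ++ [q.2])) PySem.Dict.empty := by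
    rw [List.foldl_map]; rfl
  rw [h2, PySem.Dict.getD_foldl_modify_append, PySem.Dict.getD_empty, List.nil_append,
    List.filter_map, List.map_map]
  have hc : ((fun q : String × Int => q.1 == c) ∘ fun p : Int × String => (p.2, p.1))
      = fun p : Int × String => p.2 == c := rfl
  have hv : ((fun q : String × Int => q.2) ∘ fun p : Int × String => (p.2, p.1))
      = fun p : Int × String => p.1 := rfl
  rw [hc, hv]
  exact pv_enum_filter_map tags _ _ rfl

theorem pv_prefixD_getD (tags : List String) (c : String) :
    (pvPrefixD tags).getD c [] = pvIdxs tags (fun s => PySem.Str.startswith s c) := by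
  have h2 : pvPrefixD tags = ((PySem.List.enumerate tags).flatMap
      (fun p => (PySem.List.pyRange 0 (PySem.Str.len p.2 + 1) 1).map
        (fun k => (PySem.Str.slice p.2 none (some k), p.1)))).foldl
      (fun d q => d.modify q.1 [] (fun l => l ++ [q.2])) PySem.Dict.empty := by
    rw [List.foldl_flatMap]
    apply (PySem.List.foldl_congr_mem _ _ _ _ _).symm
    intro acc p _
    rw [List.foldl_map]
  rw [h2, PySem.Dict.getD_foldl_modify_append, PySem.Dict.getD_empty, List.nil_append,
    List.filter_flatMap, List.map_flatMap]
  have hstep : ∀ p : Int × String,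
      ((( (PySem.List.pyRange 0 (PySem.Str.len p.2 + 1) 1).map
        (fun k => (PySem.Str.slice p.2 none (some k), p.1))).filter (fun q => q.1 == c)).map (fun q => q.2))
      = (if PySem.Str.startswith p.2 c then [p.1] else []) := by
    intro p
    rw [List.filter_map, List.map_map]
    have hc : ((fun q : String × Int => q.1 == c) ∘ fun k => (PySem.Str.slice p.2 none (some k), p.1))
        = fun k => PySem.Str.slice p.2 none (some k) == c := rfl
    rw [hc, pv_slice_filter]
    by_cases hsw : PySem.Str.startswith p.2 c = true
    · rw [if_pos hsw, if_pos hsw]; rfl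
    · rw [if_neg hsw, if_neg hsw]; rfl
  simp only [hstep]
  rw [pv_flatMap_if (PySem.List.enumerate tags) (fun q => PySem.Str.startswith q.2 c) (fun q => q.1)]
  exact pv_enum_filter_map tags _ _ rfl

def pvRel (t tag : String) : Bool :=
  t == tag || PySem.Str.startswith tag t || PySem.Str.startswith t tag

theorem pv_mem_idxs (tags : List String) (p : String → Bool) (i : Int) :
    i ∈ pvIdxs tags p ↔ ∃ u : Nat, u < tags.length ∧ i = (u : Int) ∧ p (tags.getD u "") = true := by
  simp only [pvIdxs, List.mem_map, List.mem_filter, List.mem_range]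
  constructor
  · rintro ⟨u, ⟨hu, hp⟩, rfl⟩; exact ⟨u, hu, rfl, hp⟩
  · rintro ⟨u, hu, rfl, hp⟩; exact ⟨u, ⟨hu, hp⟩, rfl⟩

theorem pv_pred (t s : String) :
    (PySem.Str.startswith s t = true ∨ ∃ k, k ∈ PySem.List.pyRange 0 (PySem.Str.len t) 1 ∧
      (s == PySem.Str.slice t none (some k)) = true)
    ↔ pvRel t s = true := by
  have h1 : ∀ a b : String, PySem.Str.startswith a b = b.toList.isPrefixOf a.toList := fun _ _ => rfl
  constructor
  · rintro (h | ⟨k, hk, he⟩)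
    · simp only [pvRel, Bool.or_eq_true]
      exact Or.inl (Or.inr h)
    · rw [PySem.List.mem_pyRange_one, PySem.Str.len_eq] at hk
      have heq : s.toList = t.toList.take k.toNat := by
        rw [pv_beq] at he
        have h3 := of_decide_eq_true he
        rw [h3, PySem.Str.toList_slice, PySem.Chars.slice_eq_listSlice,
          PySem.List.slice_to _ hk.1]
      have hpre : s.toList <+: t.toList := heq ▸ List.take_prefix _ _
      have hsw : PySem.Str.startswith t s = true := by
        rw [h1, List.isPrefixOf_iff_prefix]; exact hpre
      simp only [pvRel, Bool.or_eq_true]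
      exact Or.inr hsw
  · intro h
    simp only [pvRel, Bool.or_eq_true, beq_iff_eq] at h
    rcases h with (h | h) | h
    · left
      subst h
      rw [h1, List.isPrefixOf_iff_prefix]
    · left; exact h
    · by_cases hts : s = t
      · left
        subst hts
        rw [h1, List.isPrefixOf_iff_prefix]
      · right
        rw [h1] at h
        have hpre : s.toList <+: t.toList := List.isPrefixOf_iff_prefix.mp h
        have hlt : s.toList.length < t.toList.length :=
          lt_of_le_of_ne hpre.length_le
            (fun hl => hts (String.toList_inj.mp (hpre.eq_of_length hl)))
        refine ⟨(s.toList.length : Int), ?_, ?_⟩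
        · rw [PySem.List.mem_pyRange_one, PySem.Str.len_eq]
          exact ⟨by positivity, by exact_mod_cast hlt⟩
        · rw [pv_beq]
          apply decide_eq_true
          rw [pv_slice_toList]
          exact List.prefix_iff_eq_take.mp hpre

theorem pv_matched_iff (tags : List String) (t : String) (i : Int) :
    (i ∈ pvIdxs tags (fun s => PySem.Str.startswith s t) ∨
      ∃ k ∈ PySem.List.pyRange 0 (PySem.Str.len t) 1,
        i ∈ pvIdxs tags (fun s => s == PySem.Str.slice t none (some k)))
    ↔ i ∈ pvIdxs tags (pvRel t) := by
  simp only [pv_mem_idxs]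
  constructor
  · rintro (⟨u, hu, hi, hp⟩ | ⟨k, hk, u, hu, hi, hp⟩)
    · exact ⟨u, hu, hi, (pv_pred t _).mp (Or.inl hp)⟩
    · exact ⟨u, hu, hi, (pv_pred t _).mp (Or.inr ⟨k, hk, hp⟩)⟩
  · rintro ⟨u, hu, hi, hp⟩
    rcases (pv_pred t (tags.getD u "")).mpr hp with h | ⟨k, hk, he⟩
    · exact Or.inl ⟨u, hu, hi, h⟩
    · exact Or.inr ⟨k, hk, u, hu, hi, he⟩

theorem pv_mem_foldl_update (L : List Int) (g : Int → List Int) (s : PySem.Set Int) (i : Int) :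
    i ∈ L.foldl (fun s k => PySem.Set.update s (g k)) s ↔ i ∈ s ∨ ∃ k ∈ L, i ∈ g k := by
  induction L generalizing s with
  | nil => simp
  | cons x L ih =>
    rw [List.foldl_cons, ih, PySem.Set.mem_update]
    simp only [List.mem_cons]
    constructor
    · rintro ((h | h) | ⟨k, hk, h⟩)
      · exact Or.inl h
      · exact Or.inr ⟨x, Or.inl rfl, h⟩
      · exact Or.inr ⟨k, Or.inr hk, h⟩
    · rintro (h | ⟨k, (rfl | hk), h⟩)
      · exact Or.inl (Or.inl h)
      · exact Or.inl (Or.inr h)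
      · exact Or.inr ⟨k, hk, h⟩

theorem pv_nodup_foldl_update (L : List Int) (g : Int → List Int) (s : PySem.Set Int)
    (h : List.Nodup s) : List.Nodup (L.foldl (fun s k => PySem.Set.update s (g k)) s) := by
  induction L generalizing s with
  | nil => exact h
  | cons x L ih => exact ih _ (PySem.Set.nodup_update _ _ h)

theorem pv_pairwise_idxs (tags : List String) (p : String → Bool) :
    (pvIdxs tags p).Pairwise (· < ·) := by
  apply List.pairwise_map.mpr
  apply List.Pairwise.imp ?_ (List.Pairwise.filter _ List.pairwise_lt_range)
  intro a b hab
  exact_mod_cast hab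

theorem pv_nodup_idxs (tags : List String) (p : String → Bool) : (pvIdxs tags p).Nodup :=
  List.Pairwise.imp (fun h => ne_of_lt h) (pv_pairwise_idxs tags p)

def pvStepA (tags : List String) (d : PySem.Dict String (List String)) (token : String) :
    PySem.Dict String (List String) :=
  let matching_tags := tags.foldl (fun acc tag =>
    if token == tag || PySem.Str.startswith tag token || PySem.Str.startswith token tag
    then acc ++ [tag] else acc) ([] : List String)
  if matching_tags.isEmpty then d else d.insert token matching_tags

def pvStepB (tags : List String)
    (built : PySem.Dict String (List Int) × PySem.Dict String (List Int))
    (result : PySem.Dict String (List String)) (token : String) :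
    PySem.Dict String (List String) :=
  let matched : PySem.Set Int :=
    (PySem.List.pyRange 0 (PySem.Str.len token) 1).foldl
      (fun s k => PySem.Set.update s (built.2.getD (PySem.Str.slice token none (some k)) []))
      (PySem.Set.ofList (built.1.getD token []))
  if matched.isEmpty then result
  else result.insert token
    ((PySem.List.sorted matched (fun i => i)).map (fun i => PySem.List.pyGetD tags i ""))

theorem pv_step (tags : List String) (d : PySem.Dict String (List String)) (t : String) :
    pvStepB tags (pvPrefixD tags, pvExactD tags) d t = pvStepA tags d t := by
  show (if ((PySem.List.pyRange 0 (PySem.Str.len t) 1).foldl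
      (fun s k => PySem.Set.update s ((pvExactD tags).getD (PySem.Str.slice t none (some k)) []))
      (PySem.Set.ofList ((pvPrefixD tags).getD t []))).isEmpty then d
      else d.insert t ((PySem.List.sorted ((PySem.List.pyRange 0 (PySem.Str.len t) 1).foldl
      (fun s k => PySem.Set.update s ((pvExactD tags).getD (PySem.Str.slice t none (some k)) []))
      (PySem.Set.ofList ((pvPrefixD tags).getD t []))) (fun i => i)).map (fun i => PySem.List.pyGetD tags i "")))
    = pvStepA tags d t
  set X : PySem.Set Int := (PySem.List.pyRange 0 (PySem.Str.len t) 1).foldl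
      (fun s k => PySem.Set.update s ((pvExactD tags).getD (PySem.Str.slice t none (some k)) []))
      (PySem.Set.ofList ((pvPrefixD tags).getD t [])) with hX
  have hmem : ∀ i, i ∈ X ↔ i ∈ pvIdxs tags (pvRel t) := by
    intro i
    rw [hX, pv_mem_foldl_update]
    simp only [PySem.Set.mem_ofList, pv_prefixD_getD, pv_exactD_getD]
    exact pv_matched_iff tags t i
  have hnd : X.Nodup := by
    rw [hX]
    exact pv_nodup_foldl_update _ _ _ (PySem.Set.nodup_ofList _)
  have hperm : (pvIdxs tags (pvRel t)).Perm X :=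
    (List.perm_ext_iff_of_nodup (pv_nodup_idxs tags _) hnd).mpr (fun a => (hmem a).symm)
  have hsorted : PySem.List.sorted X (fun i => i) = pvIdxs tags (pvRel t) :=
    PySem.List.sorted_eq_of_perm_of_pairwise_lt X _ _ hperm (pv_pairwise_idxs tags _)
  have hmap : (pvIdxs tags (pvRel t)).map (fun i => PySem.List.pyGetD tags i "")
      = tags.filter (pvRel t) := by
    rw [pvIdxs, List.map_map]
    have hcomp : ((fun i => PySem.List.pyGetD tags i "") ∘ fun (k : Nat) => (k : Int))
        = fun k => tags.getD k "" := by
      funext k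
      simp [PySem.List.pyGetD_natCast]
    rw [hcomp, pv_filter_getD]
  have hA : tags.foldl (fun acc tag =>
      if t == tag || PySem.Str.startswith tag t || PySem.Str.startswith t tag
      then acc ++ [tag] else acc) ([] : List String) = tags.filter (pvRel t) := by
    have h0 := PySem.List.foldl_append_if_eq_filter (pvRel t) tags []
    rw [List.nil_append] at h0
    exact h0
  have hl1 : X.length = (pvIdxs tags (pvRel t)).length := hperm.length_eq.symm
  have hl2 : (tags.filter (pvRel t)).length = (pvIdxs tags (pvRel t)).length := by
    rw [← hmap, List.length_map]
  have hEmpty : X.isEmpty = (tags.filter (pvRel t)).isEmpty := by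
    rw [Bool.eq_iff_iff, List.isEmpty_iff, List.isEmpty_iff,
      ← List.length_eq_zero_iff, ← List.length_eq_zero_iff, hl1, hl2]
  show (if X.isEmpty then d
      else d.insert t ((PySem.List.sorted X (fun i => i)).map (fun i => PySem.List.pyGetD tags i "")))
    = pvStepA tags d t
  rw [hEmpty, hsorted, hmap]
  unfold pvStepA
  rw [hA]


-- ===== VERDICT (by name: the statement is the Claim_ definition above) =====
theorem map_tokens_to_tags_spec : Claim_equal_map_tokens_to_tags := by
  intro tokens tags _
  show map_tokens_to_tags tokens tags = map_tokens_to_tags_alt tokens tags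
  have hb : (PySem.List.enumerate tags).foldl
      (fun (st : PySem.Dict String (List Int) × PySem.Dict String (List Int)) p =>
        ((PySem.List.pyRange 0 (PySem.Str.len p.2 + 1) 1).foldl
            (fun d k => d.modify (PySem.Str.slice p.2 none (some k)) [] (fun l => l ++ [p.1])) st.1,
         st.2.modify p.2 [] (fun l => l ++ [p.1])))
      (PySem.Dict.empty, PySem.Dict.empty) = (pvPrefixD tags, pvExactD tags) :=
    PySem.List.foldl_prod_mk
      (fun d p => (PySem.List.pyRange 0 (PySem.Str.len p.2 + 1) 1).foldl
        (fun d k => d.modify (PySem.Str.slice p.2 none (some k)) [] (fun l => l ++ [p.1])) d)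
      (fun d p => d.modify p.2 [] (fun l => l ++ [p.1]))
      (PySem.List.enumerate tags) PySem.Dict.empty PySem.Dict.empty
  show (tokens.foldl (pvStepA tags) PySem.Dict.empty).items
      = (tokens.foldl (pvStepB tags ((PySem.List.enumerate tags).foldl
          (fun (st : PySem.Dict String (List Int) × PySem.Dict String (List Int)) p =>
            ((PySem.List.pyRange 0 (PySem.Str.len p.2 + 1) 1).foldl
                (fun d k => d.modify (PySem.Str.slice p.2 none (some k)) [] (fun l => l ++ [p.1])) st.1,
             st.2.modify p.2 [] (fun l => l ++ [p.1])))
          (PySem.Dict.empty, PySem.Dict.empty))) PySem.Dict.empty).items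
  rw [hb]
  exact congrArg PySem.Dict.items
    (PySem.List.foldl_congr_mem tokens (pvStepA tags) (pvStepB tags (pvPrefixD tags, pvExactD tags))
      PySem.Dict.empty (fun acc x _ => (pv_step tags acc x).symm))
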